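-- pv_equiv track=rewrite | github.com/BTkachenko/KIKD | labs/lab6/encoder.py | diff_encoding_color
-- ===== SOURCE A (Python) =====
-- def diff_encoding_color(pixels,bits):
--     prev = 0
--     max_value = 2**bits
--     min_value = -2**bits
--     diffs = []
--     result = []
--     M = list(range(min_value,max_value))
--     for item in pixels:
--         temp = item - prev
--         current = min(M, key=lambda x:abs(x-temp))
--         diffs.append(current)
--         prev = sum(diffs)
--
--
--     return diffs
-- ===== SOURCE B (Python) =====
-- def diff_encoding_color(pixels, bits):
--     lo = -2 ** bits
--     hi = 2 ** bits - 1
--     prev = 0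
--     out = []
--     for item in pixels:
--         d = item - prev
--         if d < lo:
--             d = lo
--         elif d > hi:
--             d = hi
--         out.append(d)
--         prev += d
--     return out
-- ===== Notes on version B (the rewrite author's own statement) =====
-- stated objective: faster
-- what changed: Replaced the per-pixel min-over-list(range(-2**bits, 2**bits)) scan by an arithmetic clamp to [-2**bits, 2**bits-1] and the per-step sum(diffs) recomputation by a running sum.
import Mathlib
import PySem

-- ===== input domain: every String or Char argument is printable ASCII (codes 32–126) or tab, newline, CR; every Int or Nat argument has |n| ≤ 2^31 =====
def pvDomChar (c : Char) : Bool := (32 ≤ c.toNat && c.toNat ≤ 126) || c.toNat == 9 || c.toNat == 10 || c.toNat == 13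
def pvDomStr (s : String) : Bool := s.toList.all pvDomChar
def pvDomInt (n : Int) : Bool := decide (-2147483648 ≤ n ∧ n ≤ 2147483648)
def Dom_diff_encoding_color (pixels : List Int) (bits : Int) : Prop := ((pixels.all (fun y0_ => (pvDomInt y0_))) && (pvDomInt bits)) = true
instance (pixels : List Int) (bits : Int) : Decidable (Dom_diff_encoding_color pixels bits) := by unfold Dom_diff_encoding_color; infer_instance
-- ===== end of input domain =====

-- B replaces A's per-pixel min-over-list(range(-2**bits, 2**bits)) scan by an arithmetic
-- clamp and A's per-step sum(diffs) recomputation by a running sum (objective: faster).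

-- ===== PORT A =====
def diff_encoding_color (pixels : List Int) (bits : Int) : List Int :=
  let max_value : Int := 2 ^ bits.toNat
  let min_value : Int := -(2 ^ bits.toNat)
  let M := PySem.List.pyRange min_value max_value 1
  (pixels.foldl (fun (st : List Int × Int) item =>
    let temp := item - st.2
    -- min(M, key=lambda x: abs(x-temp)); the getD 0 default is unreachable (M ≠ [] for bits ≥ 0)
    let current := (PySem.List.min? M (fun x => |x - temp|)).getD 0
    let diffs := st.1 ++ [current]
    (diffs, diffs.sum)) ([], 0)).1

-- ===== PORT B =====
def diff_encoding_color_alt (pixels : List Int) (bits : Int) : List Int :=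
  let lo : Int := -(2 ^ bits.toNat)
  let hi : Int := 2 ^ bits.toNat - 1
  (pixels.foldl (fun (st : List Int × Int) item =>
    let d := item - st.2
    let d' := if d < lo then lo else if d > hi then hi else d
    (st.1 ++ [d'], st.2 + d')) ([], 0)).1

-- ===== PRECONDITION & SPEC =====
-- Pre_ excludes exactly the inputs on which the Python A raises: bits < 0, where
-- 2**bits is a float and range() raises TypeError, and bits >= 62, where
-- list(range(-2**bits, 2**bits)) raises OverflowError (the range's length 2**(bits+1)
-- exceeds CPython's C ssize_t, so the list can never be materialized).
def Pre_diff_encoding_color (pixels : List Int) (bits : Int) : Prop := 0 ≤ bits ∧ bits ≤ 61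
instance (pixels : List Int) (bits : Int) : Decidable (Pre_diff_encoding_color pixels bits) := by unfold Pre_diff_encoding_color; infer_instance
def pvWitness_diff_encoding_color : List Int × Int := ([7, -3, 100, 0], 3)

def Spec_diff_encoding_color (pixels : List Int) (bits : Int) (out : List Int) : Prop := out = diff_encoding_color_alt pixels bits
instance (pixels : List Int) (bits : Int) (out : List Int) : Decidable (Spec_diff_encoding_color pixels bits out) := by unfold Spec_diff_encoding_color; infer_instance

-- ===== CLAIM (what is proved, stated in full; the proofs are below) =====
def Claim_equal_diff_encoding_color : Prop := ∀ (pixels : List Int) (bits : Int), Dom_diff_encoding_color pixels bits → Pre_diff_encoding_color pixels bits → Spec_diff_encoding_color pixels bits (diff_encoding_color pixels bits)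

-- ===== LEMMAS AND PROOFS =====

-- One step of Python min's scan: fold the head comparison into the list.
theorem pv_min_cons_cons (key : Int → Int) (a x : Int) (t : List Int) :
    PySem.List.min? (a :: x :: t) key
      = PySem.List.min? ((if key x < key a then x else a) :: t) key := by
  by_cases h : key x < key a <;> simp [PySem.List.min?, h]

-- A head with a weakly minimal key survives the whole scan.
theorem pv_min_keep (key : Int → Int) (m : Int) (xs : List Int)
    (h : ∀ y ∈ xs, ¬ key y < key m) :
    PySem.List.min? (m :: xs) key = some m := by
  induction xs with
  | nil => simp [PySem.List.min?]
  | cons x t ih =>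
    rw [pv_min_cons_cons]
    rw [if_neg (h x (List.mem_cons_self))]
    exact ih (fun y hy => h y (List.mem_cons_of_mem _ hy))

-- A strict minimizer in the tail beats any head with a larger key.
theorem pv_min_unique_aux (key : Int → Int) (m : Int) (t : List Int) (a : Int)
    (ha : key m < key a) (hm : m ∈ t) (hmin : ∀ y ∈ t, y ≠ m → key m < key y) :
    PySem.List.min? (a :: t) key = some m := by
  induction t generalizing a with
  | nil => exact absurd hm List.not_mem_nil
  | cons x t' ih =>
    rw [pv_min_cons_cons]
    by_cases hx : x = m
    · subst hx
      rw [if_pos ha]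
      refine pv_min_keep key x t' (fun y hy => not_lt.mpr ?_)
      by_cases hym : y = x
      · subst hym; exact le_refl _
      · exact le_of_lt (hmin y (List.mem_cons_of_mem _ hy) hym)
    · have hm' : m ∈ t' := by
        rcases List.mem_cons.mp hm with h | h
        · exact absurd h.symm hx
        · exact h
      have hkx : key m < key x := hmin x List.mem_cons_self hx
      have ha' : key m < key (if key x < key a then x else a) := by
        split_ifs <;> assumption
      exact ih _ ha' hm' (fun y hy hne => hmin y (List.mem_cons_of_mem _ hy) hne)

-- A unique strict minimizer is what Python's min returns.
theorem pv_min_unique (key : Int → Int) (m : Int) (xs : List Int)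
    (hm : m ∈ xs) (hmin : ∀ y ∈ xs, y ≠ m → key m < key y) :
    PySem.List.min? xs key = some m := by
  cases xs with
  | nil => exact absurd hm List.not_mem_nil
  | cons x t =>
    by_cases hx : x = m
    · subst hx
      refine pv_min_keep key x t (fun y hy => not_lt.mpr ?_)
      by_cases hym : y = x
      · subst hym; exact le_refl _
      · exact le_of_lt (hmin y (List.mem_cons_of_mem _ hy) hym)
    · have hm' : m ∈ t := by
        rcases List.mem_cons.mp hm with h | h
        · exact absurd h.symm hx
        · exact h
      exact pv_min_unique_aux key m t x (hmin x List.mem_cons_self hx) hm'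
        (fun y hy hne => hmin y (List.mem_cons_of_mem _ hy) hne)

-- min over range(-P, P) by key |x - t| is the clamp of t to [-P, P-1].
theorem pv_min_range_eq_clamp (P t c : Int) (hP : 1 ≤ P)
    (hcv : (c = -P ∧ t < -P) ∨ (c = P - 1 ∧ t > P - 1) ∨ (c = t ∧ -P ≤ t ∧ t ≤ P - 1)) :
    PySem.List.min? (PySem.List.pyRange (-P) P 1) (fun x => |x - t|) = some c := by
  have hcbound : -P ≤ c ∧ c < P := by rcases hcv with ⟨h, _⟩ | ⟨h, _⟩ | ⟨h, _, _⟩ <;> omega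
  refine pv_min_unique _ c _ (PySem.List.mem_pyRange_one.mpr ⟨hcbound.1, hcbound.2⟩) ?_
  intro y hy hne
  obtain ⟨hy1, hy2⟩ := PySem.List.mem_pyRange_one.mp hy
  have h0A : 0 ≤ |c - t| := abs_nonneg _
  have h0B : 0 ≤ |y - t| := abs_nonneg _
  rcases abs_choice (c - t) with hA | hA <;> rcases abs_choice (y - t) with hB | hB <;>
    rcases hcv with ⟨h, h'⟩ | ⟨h, h'⟩ | ⟨h, h', h''⟩ <;> omega

-- A's loop and B's loop coincide from any state (acc, acc.sum).
theorem pv_loop_eq (P : Int) (hP : 1 ≤ P) (pixels : List Int) (acc : List Int) :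
    pixels.foldl (fun (st : List Int × Int) item =>
        let temp := item - st.2
        let current := (PySem.List.min? (PySem.List.pyRange (-P) P 1)
          (fun x => |x - temp|)).getD 0
        let diffs := st.1 ++ [current]
        (diffs, diffs.sum)) (acc, acc.sum)
    = pixels.foldl (fun (st : List Int × Int) item =>
        let d := item - st.2
        let d' := if d < -P then -P else if d > P - 1 then P - 1 else d
        (st.1 ++ [d'], st.2 + d')) (acc, acc.sum) := by
  induction pixels generalizing acc with
  | nil => rfl
  | cons item rest ih =>
    have hcv : ((if item - acc.sum < -P then -P else if item - acc.sum > P - 1 then P - 1 else item - acc.sum) = -P ∧ item - acc.sum < -P)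
        ∨ ((if item - acc.sum < -P then -P else if item - acc.sum > P - 1 then P - 1 else item - acc.sum) = P - 1 ∧ item - acc.sum > P - 1)
        ∨ ((if item - acc.sum < -P then -P else if item - acc.sum > P - 1 then P - 1 else item - acc.sum) = item - acc.sum ∧ -P ≤ item - acc.sum ∧ item - acc.sum ≤ P - 1) := by
      split_ifs with h1 h2
      · exact Or.inl ⟨rfl, h1⟩
      · exact Or.inr (Or.inl ⟨rfl, h2⟩)
      · exact Or.inr (Or.inr ⟨rfl, by omega, by omega⟩)
    have hclamp := pv_min_range_eq_clamp P (item - acc.sum) _ hP hcv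
    simp only [List.foldl_cons]
    rw [hclamp]
    simp only [Option.getD_some]
    rw [show acc.sum + (if item - acc.sum < -P then -P else if item - acc.sum > P - 1 then P - 1 else item - acc.sum)
      = (acc ++ [if item - acc.sum < -P then -P else if item - acc.sum > P - 1 then P - 1 else item - acc.sum]).sum
      from by simp [List.sum_append]]
    exact ih _

-- ===== VERDICT (by name: the statement is the Claim_ definition above) =====
theorem diff_encoding_color_spec : Claim_equal_diff_encoding_color := by
  intro pixels bits _ _
  show diff_encoding_color pixels bits = diff_encoding_color_alt pixels bits
  have hP : (1 : Int) ≤ 2 ^ bits.toNat := by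
    have := pow_pos (by norm_num : (0 : Int) < 2) bits.toNat
    omega
  have h := pv_loop_eq ((2 : Int) ^ bits.toNat) hP pixels []
  simp only [List.sum_nil] at h
  simpa [diff_encoding_color, diff_encoding_color_alt] using congrArg Prod.fst h
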